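-- pv_equiv track=rewrite | github.com/jupyterhub/jupyterhub | jupyterhub/slugs.py | is_valid_display_name
-- ===== SOURCE A (Python) =====
-- import unicodedata
--
-- printable_unicode_categories_excluding_whitespace = {
--     # letters
--     "LC",
--     "Ll",
--     "Lm",
--     "Lo",
--     "Lt",
--     "Lu",
--     # marks
--     "Mc",
--     "Me",
--     "Mn",
--     # numbers
--     "Nd",
--     "Nl",
--     "No",
--     # punctuation
--     "Pc",
--     "Pd",
--     "Pe",
--     "Pf",
--     "Pi",
--     "Po",
--     "Ps",
--     # symbol
--     "Sc",
--     "Sk",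
--     "Sm",
--     "So",
-- }
--
-- def is_valid_display_name(s):
--     """check display names are valid
--
--     Between 1 and 255 chars
--     Can contain most printable non whitespace unicode characters
--     Can contain space (0x20)
--     Must not start or end with space
--     Must not contain multiple consecutive spaces
--     """
--     if len(s) < 1 or len(s) > 255:
--         return False
--     if "  " in s or s.startswith(" ") or s.endswith(" "):
--         return False
--     for c in s:
--         if c == " ":
--             continue
--         if (
--             unicodedata.category(c)
--             not in printable_unicode_categories_excluding_whitespace
--         ):
--             return False
--     return True
-- ===== SOURCE B (Python) =====
-- import unicodedata
--
--
-- def is_valid_display_name(s):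
--     """Length guard, then split on single spaces: any empty part signals a
--     leading, trailing or doubled space; every character of every part must have
--     a Unicode major category in L/M/N/P/S (letters, marks, numbers,
--     punctuation, symbols)."""
--     if not (1 <= len(s) <= 255):
--         return False
--     return all(
--         part != "" and all(unicodedata.category(c)[0] in "LMNPS" for c in part)
--         for part in s.split(" ")
--     )
-- ===== Notes on version B (the rewrite author's own statement) =====
-- stated objective: simpler
-- what changed: Replaced A's three substring checks (' ' in s, startswith, endswith) plus a per-character loop with a space-skipping continue by one split(' ') pass: any empty part rejects the space-placement rules, and each part's characters are validated by their Unicode MAJOR category being in 'LMNPS' instead of membership in the 23-element full-category set.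
import Mathlib
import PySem

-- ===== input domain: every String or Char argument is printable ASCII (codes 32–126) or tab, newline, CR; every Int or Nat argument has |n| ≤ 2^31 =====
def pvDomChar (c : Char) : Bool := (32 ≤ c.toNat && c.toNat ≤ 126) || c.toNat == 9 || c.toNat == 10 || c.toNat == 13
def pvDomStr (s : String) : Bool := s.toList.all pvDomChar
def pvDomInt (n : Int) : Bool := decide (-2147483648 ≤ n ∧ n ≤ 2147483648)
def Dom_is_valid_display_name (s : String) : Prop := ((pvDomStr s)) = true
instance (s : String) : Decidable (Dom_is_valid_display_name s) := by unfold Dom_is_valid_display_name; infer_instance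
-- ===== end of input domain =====

-- B replaces A's three substring checks plus a space-skipping character loop by a
-- split-on-space pass (no empty parts; part chars' major category in "LMNPS") — objective: simpler.


-- ===== PORT A =====
-- unicodedata.category, ported by hand; exact on the domain's characters
-- (printable ASCII 32–126 and tab/newline/CR — every remaining domain char is a C0 control, "Cc").
def pyCategory (c : Char) : String :=
  if c == ' ' then "Zs"
  else if 'a' ≤ c && c ≤ 'z' then "Ll"
  else if 'A' ≤ c && c ≤ 'Z' then "Lu"
  else if '0' ≤ c && c ≤ '9' then "Nd"
  else if ['!', '"', '#', '%', '&', '\'', '*', ',', '.', '/', ':', ';', '?', '@', '\\'].contains c then "Po"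
  else if ['(', '[', '{'].contains c then "Ps"
  else if [')', ']', '}'].contains c then "Pe"
  else if ['+', '<', '=', '>', '|', '~'].contains c then "Sm"
  else if c == '$' then "Sc"
  else if c == '-' then "Pd"
  else if ['^', '`'].contains c then "Sk"
  else if c == '_' then "Pc"
  else "Cc"

-- the module-level set printable_unicode_categories_excluding_whitespace
def printableCats : List String :=
  ["LC", "Ll", "Lm", "Lo", "Lt", "Lu", "Mc", "Me", "Mn", "Nd", "Nl", "No",
   "Pc", "Pd", "Pe", "Pf", "Pi", "Po", "Ps", "Sc", "Sk", "Sm", "So"]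

def is_valid_display_name (s : String) : Bool :=
  if PySem.Str.len s < 1 || 255 < PySem.Str.len s then false
  else if PySem.Str.isIn "  " s || PySem.Str.startswith s " " || PySem.Str.endswith s " " then false
  else s.toList.all (fun c => c == ' ' || printableCats.contains (pyCategory c))

-- ===== PORT B =====
-- unicodedata.category(c)[0] in "LMNPS" (major Unicode category is letter/mark/number/punctuation/symbol)
def allowedChar (c : Char) : Bool :=
  match (pyCategory c).toList with
  | f :: _ => "LMNPS".toList.contains f
  | [] => false

-- s.split(' '): Python's str.split with an explicit single-space separator (keeps empty parts)
def splitSp : List Char → List (List Char)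
  | [] => [[]]
  | c :: r => if c = ' ' then [] :: splitSp r else (c :: (splitSp r).headI) :: (splitSp r).tail

def is_valid_display_name_alt (s : String) : Bool :=
  if 1 ≤ PySem.Str.len s && PySem.Str.len s ≤ 255 then
    (splitSp s.toList).all (fun p => !p.isEmpty && p.all allowedChar)
  else false

-- ===== PRECONDITION & SPEC =====
def Spec_is_valid_display_name (s : String) (out : Bool) : Prop := out = is_valid_display_name_alt s
instance (s : String) (out : Bool) : Decidable (Spec_is_valid_display_name s out) := by unfold Spec_is_valid_display_name; infer_instance

-- ===== CLAIM (what is proved, stated in full; the proofs are below) =====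
def Claim_equal_is_valid_display_name : Prop := ∀ (s : String), Dom_is_valid_display_name s → Spec_is_valid_display_name s (is_valid_display_name s)

-- ===== LEMMAS AND PROOFS =====

-- the two per-character tests agree (both reject the space; parts never contain one)
set_option maxHeartbeats 1000000 in
theorem allowedChar_eq (c : Char) :
    allowedChar c = printableCats.contains (pyCategory c) := by
  unfold allowedChar pyCategory
  split_ifs <;> rfl

-- detects two consecutive spaces
def pairSpace : List Char → Bool
  | a :: b :: r => (a == ' ' && b == ' ') || pairSpace (b :: r)
  | _ => false

def checkParts (l : List Char) : Bool :=
  (splitSp l).all (fun p => !p.isEmpty && p.all allowedChar)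

theorem checkParts_nil : checkParts [] = false := by decide

theorem checkParts_sp (r : List Char) : checkParts (' ' :: r) = false := by
  simp [checkParts, splitSp]

theorem checkParts_one (c : Char) (hc : c ≠ ' ') : checkParts [c] = allowedChar c := by
  simp [checkParts, splitSp, hc]

theorem checkParts_skip (c : Char) (hc : c ≠ ' ') (r : List Char) :
    checkParts (c :: ' ' :: r) = (allowedChar c && checkParts r) := by
  simp [checkParts, splitSp, hc]

theorem checkParts_two (c d : Char) (hc : c ≠ ' ') (hd : d ≠ ' ') (r : List Char) :
    checkParts (c :: d :: r) = (allowedChar c && checkParts (d :: r)) := by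
  simp [checkParts, splitSp, hc, hd, Bool.and_assoc]

-- main characterisation of B's split-based check in terms of A's four conditions
theorem checkParts_eq : ∀ (n : Nat) (l : List Char), l.length ≤ n → l ≠ [] →
    checkParts l = (!(l.head? == some ' ') && !pairSpace l && !(l.getLast? == some ' ')
      && l.all (fun c => c == ' ' || allowedChar c)) := by
  intro n
  induction n with
  | zero =>
    intro l hl hne
    cases l with
    | nil => exact absurd rfl hne
    | cons c r => simp at hl
  | succ m ih =>
    intro l hl hne
    cases l with
    | nil => exact absurd rfl hne
    | cons c r =>
      by_cases hc : c = ' '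
      · subst hc
        rw [checkParts_sp]
        simp
      · have hcb : (c == ' ') = false := by simpa using hc
        cases r with
        | nil =>
          rw [checkParts_one c hc]
          simp [pairSpace, hcb]
        | cons d r' =>
          by_cases hd : d = ' '
          · subst hd
            rw [checkParts_skip c hc]
            cases r' with
            | nil =>
              rw [checkParts_nil]
              simp [List.getLast?_cons_cons]
            | cons e r'' =>
              have hih := ih (e :: r'') (by simp at hl ⊢; omega) (by simp)
              rw [hih]
              have hlast : ((c :: ' ' :: e :: r'').getLast? : Option Char) = (e :: r'').getLast? := by
                simp [List.getLast?_cons_cons]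
              rw [hlast]
              cases he : e == ' ' <;> cases hps : pairSpace (e :: r'') <;>
                cases hx : ((e :: r'').getLast? == some ' ') <;>
                simp [pairSpace, he, hps, hx, hcb, List.all_cons]
          · have hdb : (d == ' ') = false := by simpa using hd
            rw [checkParts_two c d hc hd]
            have hih := ih (d :: r') (by simp at hl ⊢; omega) (by simp)
            rw [hih]
            have hlast : ((c :: d :: r').getLast? : Option Char) = (d :: r').getLast? := by
              simp [List.getLast?_cons_cons]
            rw [hlast]
            cases hps : pairSpace (d :: r') <;>
              cases hx : ((d :: r').getLast? == some ' ') <;>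
              simp [pairSpace, hps, hx, hcb, hdb, List.all_cons]

theorem pairSpace_iff_infix (l : List Char) : pairSpace l = true ↔ [' ', ' '] <:+: l := by
  induction l with
  | nil => simp [pairSpace]
  | cons a t ih =>
    cases t with
    | nil =>
      simp [pairSpace]
      intro h
      rcases h.length_le with h'
      simp at h'
    | cons b r =>
      rw [List.infix_cons_iff]
      simp only [pairSpace, Bool.or_eq_true, Bool.and_eq_true, beq_iff_eq, ih]
      constructor
      · rintro (⟨ha, hb⟩ | h)
        · subst ha hb; exact Or.inl ⟨r, rfl⟩
        · exact Or.inr h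
      · rintro (h | h)
        · rw [List.cons_prefix_cons] at h
          obtain ⟨ha, h2⟩ := h
          rw [List.cons_prefix_cons] at h2
          exact Or.inl ⟨ha.symm, h2.1.symm⟩
        · exact Or.inr h

theorem singleton_suffix_iff (a : Char) (l : List Char) :
    [a] <:+ l ↔ l.getLast? = some a := by
  constructor
  · rintro ⟨t, rfl⟩; simp
  · intro h
    rcases List.getLast?_eq_some_iff.mp h with ⟨l', rfl⟩
    exact ⟨l', rfl⟩

theorem isIn_two_spaces (s : String) : PySem.Str.isIn "  " s = pairSpace s.toList := by
  cases h : pairSpace s.toList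
  · rw [Bool.eq_false_iff] at h ⊢
    intro hin
    exact h (by rw [pairSpace_iff_infix]; exact (PySem.Str.isIn_iff_infix _ _).mp hin)
  · exact (PySem.Str.isIn_iff_infix _ _).mpr ((pairSpace_iff_infix _).mp h)

theorem startswith_space (s : String) :
    PySem.Str.startswith s " " = (s.toList.head? == some ' ') := by
  have hiff : PySem.Chars.startswith s.toList " ".toList = true ↔ " ".toList <+: s.toList :=
    PySem.Chars.startswith_iff s.toList " ".toList
  cases hl : s.toList with
  | nil =>
    simp only [PySem.Str.startswith_eq, hl] at hiff ⊢
    cases h : PySem.Chars.startswith ([] : List Char) " ".toList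
    · simp
    · exfalso
      have := hiff.mp h
      simp at this
  | cons c t =>
    simp only [PySem.Str.startswith_eq, hl] at hiff ⊢
    have h2 : " ".toList <+: (c :: t) ↔ c = ' ' := by
      constructor
      · intro h
        have : (' ' :: []) <+: (c :: t) := by simpa using h
        rw [List.cons_prefix_cons] at this
        exact this.1.symm
      · intro h; subst h; exact ⟨t, by simp⟩
    cases h : PySem.Chars.startswith (c :: t) " ".toList
    · have : ¬ c = ' ' := fun hc => by
        rw [Bool.eq_false_iff] at h; exact h (hiff.mpr (h2.mpr hc))
      simp [this]
    · have hc : c = ' ' := h2.mp (hiff.mp h)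
      simp [hc]

theorem endswith_space (s : String) :
    PySem.Str.endswith s " " = (s.toList.getLast? == some ' ') := by
  cases h : (s.toList.getLast? == some ' ')
  · rw [Bool.eq_false_iff] at h ⊢
    intro hew
    have hsuf : [' '] <:+ s.toList := by
      have := (PySem.Chars.endswith_iff s.toList " ".toList).mp (by simpa using hew)
      simpa using this
    exact h (by simp [(singleton_suffix_iff _ _).mp hsuf])
  · have hlast : s.toList.getLast? = some ' ' := by simpa using h
    have hsuf : [' '] <:+ s.toList := (singleton_suffix_iff _ _).mpr hlast
    have := (PySem.Chars.endswith_iff s.toList " ".toList).mpr (by simpa using hsuf)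
    simpa using this

-- ===== VERDICT (by name: the statement is the Claim_ definition above) =====
theorem is_valid_display_name_spec : Claim_equal_is_valid_display_name := by
  intro s _
  show is_valid_display_name s = is_valid_display_name_alt s
  unfold is_valid_display_name is_valid_display_name_alt
  have hlen : PySem.Str.len s = (s.toList.length : Int) := by simp
  by_cases hL : 1 ≤ PySem.Str.len s ∧ PySem.Str.len s ≤ 255
  · have hg1 : (PySem.Str.len s < 1 || 255 < PySem.Str.len s) = false := by
      simp only [Bool.or_eq_false_iff, decide_eq_false_iff_not, not_lt]
      exact ⟨hL.1, hL.2⟩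
    have hg2 : (1 ≤ PySem.Str.len s && PySem.Str.len s ≤ 255) = true := by
      simp only [Bool.and_eq_true, decide_eq_true_eq]
      exact hL
    rw [hg1, hg2]
    simp only [Bool.false_eq_true, if_false, if_true]
    have hne : s.toList ≠ [] := by
      intro h
      rw [hlen, h] at hL
      simp at hL
    have hB : (splitSp s.toList).all (fun p => !p.isEmpty && p.all allowedChar)
        = checkParts s.toList := rfl
    rw [hB, checkParts_eq s.toList.length s.toList le_rfl hne,
      isIn_two_spaces, startswith_space, endswith_space]
    have hall : (s.toList.all (fun c => c == ' ' || printableCats.contains (pyCategory c)))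
        = s.toList.all (fun c => c == ' ' || allowedChar c) := by
      simp [allowedChar_eq]
    rw [hall]
    cases h1 : (s.toList.head? == some ' ') <;> cases h2 : pairSpace s.toList <;>
      cases h3 : (s.toList.getLast? == some ' ') <;> simp
  · have hg2 : (1 ≤ PySem.Str.len s && PySem.Str.len s ≤ 255) = false := by
      simp only [Bool.and_eq_false_iff, decide_eq_false_iff_not, not_le]
      omega
    have hg1 : (PySem.Str.len s < 1 || 255 < PySem.Str.len s) = true := by
      simp only [Bool.or_eq_true, decide_eq_true_eq]
      omega
    rw [hg1, hg2]
    simp
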